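-- pv_equiv track=rewrite | github.com/chubkey3/DMOJ | ccc13s3.py | search
-- ===== SOURCE A (Python) =====
-- def search(g, t):
--     l = []
--
--     if g == []:
--         return list(t.values())
--
--     tc = t.copy()
--
--     tc[g[0][0]] += 3
--
--     l += search(g[1: ], tc)
--
--     tc = t.copy()
--
--     tc[g[0][1]] += 3
--
--     l += search(g[1: ], tc)
--
--     tc = t.copy()
--
--     tc[g[0][0]] += 1
--     tc[g[0][1]] += 1
--
--     l += search(g[1: ], tc)
--
--     return l
-- ===== SOURCE B (Python) =====
-- def search(g, t):
--     frontier = [dict(t)]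
--     for a, b in g:
--         nf = []
--         for d in frontier:
--             d1 = dict(d); d1[a] += 3
--             d2 = dict(d); d2[b] += 3
--             d3 = dict(d); d3[a] += 1; d3[b] += 1
--             nf += [d1, d2, d3]
--         frontier = nf
--     return [v for d in frontier for v in d.values()]
-- ===== Notes on version B (the rewrite author's own statement) =====
-- stated objective: alternative
-- what changed: Replaces A's three-way depth-first recursion with an iterative breadth-first frontier of partial score dicts, expanded game by game and flattened at the end.
-- outside the precondition, e.g. on search([('a', 'b')], {'a': 0}): A raises KeyError, B raises KeyError
import Mathlib
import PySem

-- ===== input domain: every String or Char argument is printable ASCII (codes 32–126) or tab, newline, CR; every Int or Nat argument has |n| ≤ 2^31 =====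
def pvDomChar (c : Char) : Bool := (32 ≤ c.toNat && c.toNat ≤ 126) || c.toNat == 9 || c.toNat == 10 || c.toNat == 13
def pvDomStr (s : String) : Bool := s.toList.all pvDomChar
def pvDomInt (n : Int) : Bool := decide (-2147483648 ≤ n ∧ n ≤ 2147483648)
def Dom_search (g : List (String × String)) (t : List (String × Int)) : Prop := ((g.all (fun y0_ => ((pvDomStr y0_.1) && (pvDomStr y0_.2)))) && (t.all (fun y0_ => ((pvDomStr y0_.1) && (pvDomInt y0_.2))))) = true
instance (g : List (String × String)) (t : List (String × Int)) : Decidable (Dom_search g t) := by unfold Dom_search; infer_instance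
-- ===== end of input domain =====

-- B replaces A's three-way recursion by an iterative frontier of partial score dicts,
-- flattened at the end (objective: alternative decomposition, same cost).

-- ===== PORT A =====
-- A's recursion over games; `tc[k] += 3` is Dict.modify (key present by Pre_search).
def searchGo (g : List (String × String)) (d : PySem.Dict String Int) : List Int :=
  match g with
  | [] => d.values
  | (a, b) :: rest =>
      searchGo rest (d.modify a 0 (· + 3)) ++
      searchGo rest (d.modify b 0 (· + 3)) ++
      searchGo rest ((d.modify a 0 (· + 1)).modify b 0 (· + 1))

def search (g : List (String × String)) (t : List (String × Int)) : List Int :=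
  searchGo g (PySem.Dict.ofList t)

-- ===== PORT B =====
-- one game expands one partial state into its three outcome states (home win, away win, draw)
def expand3 (p : String × String) (d : PySem.Dict String Int) : List (PySem.Dict String Int) :=
  [d.modify p.1 0 (· + 3), d.modify p.2 0 (· + 3), (d.modify p.1 0 (· + 1)).modify p.2 0 (· + 1)]

def search_alt (g : List (String × String)) (t : List (String × Int)) : List Int :=
  (g.foldl (fun fr p => fr.flatMap (expand3 p)) [PySem.Dict.ofList t]).flatMap PySem.Dict.values

-- ===== PRECONDITION & SPEC =====
-- Pre_ excludes inputs where a team named in g is not a key of t: Python A raises KeyError there (B raises too).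
def Pre_search (g : List (String × String)) (t : List (String × Int)) : Prop :=
  (g.all (fun p => (PySem.Dict.ofList t).contains p.1 && (PySem.Dict.ofList t).contains p.2)) = true
instance (g : List (String × String)) (t : List (String × Int)) : Decidable (Pre_search g t) := by unfold Pre_search; infer_instance

def pvWitness_search : (List (String × String)) × (List (String × Int)) :=
  ([("a", "b"), ("b", "c")], [("a", 0), ("b", 1), ("c", 2)])

def Spec_search (g : List (String × String)) (t : List (String × Int)) (out : List Int) : Prop := out = search_alt g t
instance (g : List (String × String)) (t : List (String × Int)) (out : List Int) : Decidable (Spec_search g t out) := by unfold Spec_search; infer_instance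

-- ===== CLAIM (what is proved, stated in full; the proofs are below) =====
def Claim_equal_search : Prop := ∀ (g : List (String × String)) (t : List (String × Int)), Dom_search g t → Pre_search g t → Spec_search g t (search g t)

-- ===== LEMMAS AND PROOFS =====

-- frontier invariant: folding the remaining games over a frontier and flattening
-- equals flat-mapping A's recursion over the frontier
theorem frontier_inv (g : List (String × String)) (fr : List (PySem.Dict String Int)) :
    (g.foldl (fun fr p => fr.flatMap (expand3 p)) fr).flatMap PySem.Dict.values
      = fr.flatMap (searchGo g) := by
  induction g generalizing fr with
  | nil => simp [searchGo]
  | cons p rest ih =>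
      obtain ⟨a, b⟩ := p
      rw [List.foldl_cons, ih, List.flatMap_assoc]
      simp [expand3, searchGo]

-- ===== VERDICT (by name: the statement is the Claim_ definition above) =====
theorem search_spec : Claim_equal_search := by
  intro g t _ _
  unfold Spec_search search search_alt
  rw [frontier_inv]
  simp
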